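-- pv_equiv track=rewrite | github.com/Enzo-Nunes/Projects | FP/Caloiros2023/project1.py | eh_territorio
-- ===== SOURCE A (Python) =====
-- def eh_territorio(arg) -> bool:
-- 	"""	Recebe um argumento de qualquer tipo e devolve True se o seu argumento
-- 		corresponde a um territorio e False caso contrario."""
--
-- 	if not isinstance(arg, tuple):
-- 		return False
-- 	for x in arg:
-- 		if not isinstance(x, tuple):
-- 			return False
-- 		if len(x) != len(arg[0]):
-- 			return False
-- 		for y in x:
-- 			if not isinstance(y, int):
-- 				return False
-- 			if y != 0 and y != 1:
-- 				return False
--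
-- 	return True
-- ===== SOURCE B (Python) =====
-- def eh_territorio(arg) -> bool:
--     if not isinstance(arg, tuple):
--         return False
--     if not all(isinstance(row, tuple) for row in arg):
--         return False
--     if len({len(row) for row in arg}) > 1:
--         return False
--     return all(isinstance(v, int) and v in (0, 1) for row in arg for v in row)
-- ===== Notes on version B (the rewrite author's own statement) =====
-- stated objective: simpler
-- what changed: Replaced A's single fused nested scan (each row compared to arg[0] and its cells checked inline, with early returns) by staged whole-structure passes: a row type pass, a uniform-width check via the set of row lengths, and one flat all() over all cells.
import Mathlib
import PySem

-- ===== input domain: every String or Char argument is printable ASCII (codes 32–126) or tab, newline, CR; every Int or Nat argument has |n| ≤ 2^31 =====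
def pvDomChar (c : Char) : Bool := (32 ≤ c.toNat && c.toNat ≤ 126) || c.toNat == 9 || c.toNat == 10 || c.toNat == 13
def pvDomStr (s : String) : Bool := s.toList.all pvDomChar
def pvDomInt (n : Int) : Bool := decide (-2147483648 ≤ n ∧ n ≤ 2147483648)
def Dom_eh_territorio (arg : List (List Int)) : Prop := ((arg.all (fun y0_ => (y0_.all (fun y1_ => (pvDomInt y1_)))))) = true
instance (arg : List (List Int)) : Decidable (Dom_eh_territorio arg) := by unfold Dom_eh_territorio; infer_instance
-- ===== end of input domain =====

-- B changes only the decomposition (staged whole-structure passes instead of A's fused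
-- nested loop with early returns); same values on all inputs of the type.
-- Under the type List (List Int), Python's isinstance checks are always true and are
-- not represented; len(arg[0]) is only evaluated inside the loop (arg nonempty), so
-- 'headD []' is exact there.

-- ===== PORT A =====
-- inner 'for y in x' loop of A
def ehCellLoopA : List Int → Bool
  | [] => true
  | y :: ys => if y ≠ 0 ∧ y ≠ 1 then false else ehCellLoopA ys

-- outer 'for x in arg' loop of A (first parameter carries arg, for 'len(arg[0])')
def ehRowLoopA (arg : List (List Int)) : List (List Int) → Bool
  | [] => true
  | x :: xs =>
      if x.length ≠ (arg.headD []).length then false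
      else if ehCellLoopA x then ehRowLoopA arg xs else false

def eh_territorio (arg : List (List Int)) : Bool := ehRowLoopA arg arg

-- ===== PORT B =====
-- staged passes: the row-type pass of Source B is vacuous under the type and not represented;
-- set of row lengths, then one flat pass over all cells
def eh_territorio_alt (arg : List (List Int)) : Bool :=
  if 1 < (PySem.Set.ofList (arg.map List.length)).length then false
  else (arg.flatMap (fun row => row)).all (fun v => v == 0 || v == 1)

-- ===== PRECONDITION & SPEC =====
def Spec_eh_territorio (arg : List (List Int)) (out : Bool) : Prop := out = eh_territorio_alt arg
instance (arg : List (List Int)) (out : Bool) : Decidable (Spec_eh_territorio arg out) := by unfold Spec_eh_territorio; infer_instance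

-- ===== CLAIM (what is proved, stated in full; the proofs are below) =====
def Claim_equal_eh_territorio : Prop := ∀ (arg : List (List Int)), Dom_eh_territorio arg → Spec_eh_territorio arg (eh_territorio arg)

-- ===== LEMMAS AND PROOFS =====

theorem ehCellLoopA_eq (l : List Int) :
    ehCellLoopA l = l.all (fun v => v == 0 || v == 1) := by
  induction l with
  | nil => rfl
  | cons y ys ih =>
      simp only [ehCellLoopA, List.all_cons, ih]
      by_cases h0 : y = 0 <;> by_cases h1 : y = 1 <;> simp [h0, h1]

theorem ehRowLoopA_eq (arg rows : List (List Int)) :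
    ehRowLoopA arg rows =
      (rows.all (fun x => x.length == (arg.headD []).length) &&
       rows.all (fun x => x.all (fun v => v == 0 || v == 1))) := by
  induction rows with
  | nil => rfl
  | cons x xs ih =>
      simp only [ehRowLoopA, List.all_cons, ih, ehCellLoopA_eq]
      split_ifs with hl hc
      · have h : (x.length == (arg.headD []).length) = false := beq_eq_false_iff_ne.mpr hl
        simp only [h, Bool.false_and]
      · have hl' : x.length = (arg.headD []).length := not_ne_iff.mp hl
        simp only [beq_iff_eq.mpr hl', hc, Bool.true_and]
      · have hl' : x.length = (arg.headD []).length := not_ne_iff.mp hl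
        have hcf : (x.all fun v => v == 0 || v == 1) = false := Bool.eq_false_iff.mpr hc
        simp only [beq_iff_eq.mpr hl', hcf, Bool.true_and, Bool.false_and, Bool.and_false]

-- the set of row lengths has at most one element iff every row length equals the first
theorem setLen_le_one_iff (arg : List (List Int)) :
    (PySem.Set.ofList (arg.map List.length)).length ≤ 1 ↔
      ∀ x ∈ arg, x.length = (arg.headD []).length := by
  cases arg with
  | nil => simp [PySem.Set.ofList_nil]
  | cons a t =>
      constructor
      · intro h x hx
        have hmem : x.length ∈ PySem.Set.ofList ((a :: t).map List.length) := by
          rw [PySem.Set.mem_ofList]; exact List.mem_map_of_mem hx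
        have hhead : a.length ∈ PySem.Set.ofList ((a :: t).map List.length) := by
          rw [PySem.Set.mem_ofList]; simp
        match hS : PySem.Set.ofList ((a :: t).map List.length) with
        | [] => rw [hS] at hmem; simp at hmem
        | [b] =>
            rw [hS] at hmem hhead; simp at hmem hhead
            simp [List.headD, hmem, hhead]
        | b :: c :: r => rw [hS] at h; simp at h
      · intro h
        have : PySem.Set.ofList ((a :: t).map List.length) =
            a.length :: PySem.Set.discard (PySem.Set.ofList (t.map List.length)) a.length := by
          simp [PySem.Set.ofList_cons]
        rw [this]
        have hd : PySem.Set.discard (PySem.Set.ofList (t.map List.length)) a.length = [] := by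
          apply List.eq_nil_iff_forall_not_mem.mpr
          intro y hy
          rw [PySem.Set.mem_discard] at hy
          obtain ⟨hy1, hy2⟩ := hy
          rw [PySem.Set.mem_ofList, List.mem_map] at hy1
          obtain ⟨x, hx, rfl⟩ := hy1
          exact hy2 (h x (List.mem_cons_of_mem a hx))
        simp [hd]

-- ===== VERDICT (by name: the statement is the Claim_ definition above) =====
theorem eh_territorio_spec : Claim_equal_eh_territorio := by
  intro arg _
  unfold Spec_eh_territorio eh_territorio eh_territorio_alt
  rw [ehRowLoopA_eq]
  by_cases hlen : 1 < (PySem.Set.ofList (arg.map List.length)).length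
  · have h2 : ¬ ∀ x ∈ arg, x.length = (arg.headD []).length := by
      intro h; exact absurd ((setLen_le_one_iff arg).mpr h) (by omega)
    rw [if_pos hlen]
    rw [Bool.and_eq_false_iff]
    left
    have h3 : arg.all (fun x => x.length == (arg.headD []).length) ≠ true := by
      intro hall
      exact h2 (fun x hx => beq_iff_eq.mp (List.all_eq_true.mp hall x hx))
    exact Bool.eq_false_iff.mpr h3
  · have h2 : ∀ x ∈ arg, x.length = (arg.headD []).length :=
      (setLen_le_one_iff arg).mp (by omega)
    rw [if_neg hlen]
    have hfst : arg.all (fun x => x.length == (arg.headD []).length) = true :=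
      List.all_eq_true.mpr (fun x hx => beq_iff_eq.mpr (h2 x hx))
    rw [hfst, Bool.true_and, List.all_flatMap]
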